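-- pv_equiv track=rewrite | github.com/joshanashakya/dissertation | workspace/dataset/java-python/GeeksForGeeks/3489/A/2.py | findMinCost
-- ===== SOURCE A (Python) =====
-- def findMinCost(arr, n, choc_cost):
--
--     # To reach first station,
--     # initial chocolates required
--     choc_buy = arr[0]
--     curr_choc = 0
--
--     # Start traversing
--     for i in range(0,n - 1):
--
--         # Find no. of chocolates lose
--         # or gain
--         choc = arr[i] - arr[i + 1]
--
--         # Add into curr_coc
--         curr_choc += choc
--
--         # if no. of chocolates becomes
--         # negative that means we have
--         # to buy that no. of chocolates
--         if (curr_choc < 0):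
--             choc_buy += abs(curr_choc)
--             curr_choc = 0
--
--     # Return cost required
--     return choc_buy * choc_cost
-- ===== SOURCE B (Python) =====
-- def findMinCost(arr, n, choc_cost):
--     # Running-maximum scan: total chocolates bought equals the maximum
--     # station value among arr[0..n-1].
--     best = arr[0]
--     for i in range(1, n):
--         if arr[i] > best:
--             best = arr[i]
--     return best * choc_cost
-- ===== Notes on version B (the rewrite author's own statement) =====
-- stated objective: simpler
-- what changed: Replaced the running-balance-with-reset accumulation (tracking curr_choc and buying on deficit) by a direct running-maximum scan (one comparison per step instead of subtraction/accumulation/abs), since the total bought equals max(arr[0..n-1]).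
import Mathlib
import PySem

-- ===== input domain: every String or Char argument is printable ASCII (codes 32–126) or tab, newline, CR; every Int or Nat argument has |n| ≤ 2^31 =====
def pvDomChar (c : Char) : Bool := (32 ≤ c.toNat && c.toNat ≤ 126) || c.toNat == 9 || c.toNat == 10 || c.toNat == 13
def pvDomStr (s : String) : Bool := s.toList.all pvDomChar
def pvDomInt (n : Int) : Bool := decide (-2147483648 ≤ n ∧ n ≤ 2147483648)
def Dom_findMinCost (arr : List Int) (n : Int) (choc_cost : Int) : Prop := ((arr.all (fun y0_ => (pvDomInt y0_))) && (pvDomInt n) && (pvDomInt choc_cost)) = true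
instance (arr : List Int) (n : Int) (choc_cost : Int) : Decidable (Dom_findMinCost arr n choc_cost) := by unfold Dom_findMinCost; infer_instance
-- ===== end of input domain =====

-- B replaces A's running-balance-with-reset by a plain running-maximum scan (same cost, simpler).

-- ===== PORT A =====
def findMinCost (arr : List Int) (n : Int) (choc_cost : Int) : Int :=
  let init : Int × Int := (PySem.List.pyGetD arr 0 0, 0)
  let s :=
    (PySem.List.pyRange 0 (n - 1) 1).foldl
      (fun (st : Int × Int) i =>
        let choc := PySem.List.pyGetD arr i 0 - PySem.List.pyGetD arr (i + 1) 0
        let curr := st.2 + choc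
        if curr < 0 then (st.1 + |curr|, 0) else (st.1, curr))
      init
  s.1 * choc_cost

-- ===== PORT B =====
def findMinCost_alt (arr : List Int) (n : Int) (choc_cost : Int) : Int :=
  let best :=
    (PySem.List.pyRange 1 n 1).foldl
      (fun best i => if PySem.List.pyGetD arr i 0 > best then PySem.List.pyGetD arr i 0 else best)
      (PySem.List.pyGetD arr 0 0)
  best * choc_cost

-- ===== PRECONDITION & SPEC =====
-- Pre_: arr nonempty (A reads arr[0]) and n ≤ len(arr) (else A's arr[i+1] raises IndexError).
def Pre_findMinCost (arr : List Int) (n : Int) (choc_cost : Int) : Prop :=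
  arr ≠ [] ∧ n ≤ (arr.length : Int)
instance (arr : List Int) (n : Int) (choc_cost : Int) : Decidable (Pre_findMinCost arr n choc_cost) := by unfold Pre_findMinCost; infer_instance
def pvWitness_findMinCost : List Int × Int × Int := ([3, 1, 4], 3, 2)
def Spec_findMinCost (arr : List Int) (n : Int) (choc_cost : Int) (out : Int) : Prop := out = findMinCost_alt arr n choc_cost
instance (arr : List Int) (n : Int) (choc_cost : Int) (out : Int) : Decidable (Spec_findMinCost arr n choc_cost out) := by unfold Spec_findMinCost; infer_instance

-- ===== CLAIM (what is proved, stated in full; the proofs are below) =====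
def Claim_equal_findMinCost : Prop := ∀ (arr : List Int) (n : Int) (choc_cost : Int), Dom_findMinCost arr n choc_cost → Pre_findMinCost arr n choc_cost → Spec_findMinCost arr n choc_cost (findMinCost arr n choc_cost)

-- ===== LEMMAS AND PROOFS =====

-- The loop invariant: after folding over indices 0..m-1, A's state is
-- (M, M - arr[m]) where M is B's running maximum over indices 1..m.
theorem pv_inv (arr : List Int) (m : Nat) :
    (PySem.List.pyRange 0 (m : Int) 1).foldl
      (fun (st : Int × Int) i =>
        let choc := PySem.List.pyGetD arr i 0 - PySem.List.pyGetD arr (i + 1) 0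
        let curr := st.2 + choc
        if curr < 0 then (st.1 + |curr|, 0) else (st.1, curr))
      (PySem.List.pyGetD arr 0 0, 0)
    =
    (((PySem.List.pyRange 1 ((m : Int) + 1) 1).foldl
        (fun best i => if PySem.List.pyGetD arr i 0 > best then PySem.List.pyGetD arr i 0 else best)
        (PySem.List.pyGetD arr 0 0)),
     ((PySem.List.pyRange 1 ((m : Int) + 1) 1).foldl
        (fun best i => if PySem.List.pyGetD arr i 0 > best then PySem.List.pyGetD arr i 0 else best)
        (PySem.List.pyGetD arr 0 0)) - PySem.List.pyGetD arr (m : Int) 0) := by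
  induction m with
  | zero =>
      simp [PySem.List.pyRange_one_eq_nil]
  | succ k ih =>
      have h1 : (PySem.List.pyRange 0 ((k : Int) + 1) 1)
          = PySem.List.pyRange 0 (k : Int) 1 ++ [(k : Int)] :=
        PySem.List.pyRange_one_succ_right (by positivity)
      have h2 : (PySem.List.pyRange 1 ((k : Int) + 1 + 1) 1)
          = PySem.List.pyRange 1 ((k : Int) + 1) 1 ++ [(k : Int) + 1] :=
        PySem.List.pyRange_one_succ_right (by omega)
      push_cast
      rw [h1, h2, List.foldl_append, List.foldl_append, ih]
      simp only [List.foldl_cons, List.foldl_nil]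
      set M := (PySem.List.pyRange 1 ((k : Int) + 1) 1).foldl
        (fun best i => if PySem.List.pyGetD arr i 0 > best then PySem.List.pyGetD arr i 0 else best)
        (PySem.List.pyGetD arr 0 0) with hM
      set g := PySem.List.pyGetD arr ((k : Int) + 1) 0 with hg
      by_cases h : M - PySem.List.pyGetD arr (k : Int) 0 +
          (PySem.List.pyGetD arr (k : Int) 0 - g) < 0
      · simp only [h, if_true]
        have hgM : g > M := by omega
        have habs : |M - PySem.List.pyGetD arr (k : Int) 0 +
            (PySem.List.pyGetD arr (k : Int) 0 - g)| = g - M := by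
          rw [abs_of_neg h]; ring
        rw [habs]
        simp only [hgM, if_pos]
        rw [Prod.mk.injEq]; constructor <;> ring
      · simp only [h, if_false]
        have hgM : ¬ (g > M) := by omega
        simp only [hgM, if_false]
        rw [Prod.mk.injEq]; constructor <;> ring

theorem pv_main (arr : List Int) (n choc_cost : Int) :
    findMinCost arr n choc_cost = findMinCost_alt arr n choc_cost := by
  unfold findMinCost findMinCost_alt
  by_cases hn : n ≤ 1
  · rw [PySem.List.pyRange_one_eq_nil (by omega : n - 1 ≤ 0),
        PySem.List.pyRange_one_eq_nil (by omega : n ≤ 1)]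
    simp
  · obtain ⟨m, hm⟩ : ∃ m : Nat, n - 1 = (m : Int) := ⟨(n - 1).toNat, by omega⟩
    have hn' : n = (m : Int) + 1 := by omega
    rw [hm, hn']
    have := pv_inv arr m
    simp only [this]

-- ===== VERDICT (by name: the statement is the Claim_ definition above) =====
theorem findMinCost_spec : Claim_equal_findMinCost := by
  intro arr n choc_cost _ _
  exact pv_main arr n choc_cost
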